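-- pv_equiv track=rewrite | github.com/victoriavmc/ABM-con-Json-Funciones-Apunte | Banco/entidad_Bancaria.py | funcion4
-- ===== SOURCE A (Python) =====
-- def funcion4(plistadoJson):
--     contador = 0
--     contador2 = 0
--     for listados in plistadoJson:
--         if (listados["Saldo Negativo:"]) == "N":
--             contador += 1
--         elif (listados["Saldo Negativo:"]) == "S":
--             contador2 += 1
--     return contador, contador2
-- ===== SOURCE B (Python) =====
-- def funcion4(plistadoJson):
--     vals = [l["Saldo Negativo:"] for l in plistadoJson]
--     return vals.count("N"), vals.count("S")
-- ===== Notes on version B (the rewrite author's own statement) =====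
-- stated objective: idiomatic
-- what changed: Replaces the single-pass two-accumulator branching loop with staged passes: extract the flag column once, then count each target value with list.count.
import Mathlib
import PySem

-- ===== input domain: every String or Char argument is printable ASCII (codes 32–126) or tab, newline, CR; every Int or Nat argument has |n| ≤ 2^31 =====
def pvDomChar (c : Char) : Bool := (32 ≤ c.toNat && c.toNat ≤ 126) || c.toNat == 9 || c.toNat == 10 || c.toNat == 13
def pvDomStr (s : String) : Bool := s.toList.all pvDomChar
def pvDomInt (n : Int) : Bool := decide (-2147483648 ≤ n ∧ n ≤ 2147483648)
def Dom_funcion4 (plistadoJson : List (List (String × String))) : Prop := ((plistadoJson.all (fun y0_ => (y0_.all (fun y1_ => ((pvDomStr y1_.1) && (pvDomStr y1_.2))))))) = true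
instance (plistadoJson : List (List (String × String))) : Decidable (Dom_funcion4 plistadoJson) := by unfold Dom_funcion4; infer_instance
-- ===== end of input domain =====

-- B replaces A's single-pass two-accumulator branching loop with staged passes: extract the flag column, then count each target value (idiomatic, same cost).


-- ===== PORT A =====
-- A's loop with two counters; dict subscript ported via Dict.get? (none = KeyError, excluded by Pre_).
def funcion4 (plistadoJson : List (List (String × String))) : Int × Int :=
  let p := plistadoJson.foldl
    (fun (acc : Int × Int) listados =>
      match (PySem.Dict.mk listados).get? "Saldo Negativo:" with
      | some v => if v = "N" then (acc.1 + 1, acc.2) else if v = "S" then (acc.1, acc.2 + 1) else acc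
      | none => acc)  -- KeyError in Python; unreached under Pre_
    (0, 0)
  p

-- ===== PORT B =====
-- B: extract the flag column once, then count each target value with list.count.
def funcion4_alt (plistadoJson : List (List (String × String))) : Int × Int :=
  let vals := plistadoJson.map
    (fun l => ((PySem.Dict.mk l).get? "Saldo Negativo:").getD "")  -- KeyError in Python; unreached under Pre_
  ((PySem.List.count vals "N" : Int), (PySem.List.count vals "S" : Int))

-- ===== PRECONDITION & SPEC =====
-- Pre_ excludes exactly the entries missing the key "Saldo Negativo:", on which Python A raises KeyError.
def Pre_funcion4 (plistadoJson : List (List (String × String))) : Prop :=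
  ∀ l ∈ plistadoJson, ((PySem.Dict.mk l).get? "Saldo Negativo:").isSome = true
instance (plistadoJson : List (List (String × String))) : Decidable (Pre_funcion4 plistadoJson) := by unfold Pre_funcion4; infer_instance
def pvWitness_funcion4 : (List (List (String × String))) := [[("Saldo Negativo:", "N")], [("Saldo Negativo:", "S")]]

def Spec_funcion4 (plistadoJson : List (List (String × String))) (out : Int × Int) : Prop := out = funcion4_alt plistadoJson
instance (plistadoJson : List (List (String × String))) (out : Int × Int) : Decidable (Spec_funcion4 plistadoJson out) := by unfold Spec_funcion4; infer_instance

-- ===== CLAIM (what is proved, stated in full; the proofs are below) =====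
def Claim_equal_funcion4 : Prop := ∀ (plistadoJson : List (List (String × String))), Dom_funcion4 plistadoJson → Pre_funcion4 plistadoJson → Spec_funcion4 plistadoJson (funcion4 plistadoJson)

-- ===== LEMMAS AND PROOFS =====

-- the looked-up flag of one entry (with "" standing for Python's KeyError case, unreached under Pre_)
def pvFlag (l : List (String × String)) : String :=
  ((PySem.Dict.mk l).get? "Saldo Negativo:").getD ""

lemma funcion4_foldl_eq (pl : List (List (String × String))) (a b : Int) :
    pl.foldl
      (fun (acc : Int × Int) listados =>
        match (PySem.Dict.mk listados).get? "Saldo Negativo:" with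
        | some v => if v = "N" then (acc.1 + 1, acc.2) else if v = "S" then (acc.1, acc.2 + 1) else acc
        | none => acc)
      (a, b)
    = (a + ((pl.map pvFlag).count "N" : Int), b + ((pl.map pvFlag).count "S" : Int)) := by
  induction pl generalizing a b with
  | nil => simp
  | cons l t ih =>
    simp only [List.foldl_cons, List.map_cons]
    rcases h : (PySem.Dict.mk l).get? "Saldo Negativo:" with _ | v
    · simp [ih, pvFlag, h]
    · by_cases hN : v = "N"
      · subst hN; simp [ih, pvFlag, h]; omega
      · by_cases hS : v = "S"
        · subst hS; simp [ih, pvFlag, h, hN]; omega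
        · simp [ih, pvFlag, h, hN, hS]

-- ===== VERDICT (by name: the statement is the Claim_ definition above) =====
theorem funcion4_spec : Claim_equal_funcion4 := by
  intro pl _ _
  unfold Spec_funcion4 funcion4 funcion4_alt
  rw [funcion4_foldl_eq]
  unfold pvFlag
  simp [PySem.List.count_eq]
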